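-- pv_equiv track=rewrite | github.com/kaluginpeter/Algorithms_and_structures_tasks | CodeWars/7kyu/Print_a_Rectangle_Using_Asterisks.py | get_rectangle_string
-- ===== SOURCE A (Python) =====
-- def get_rectangle_string(width, height):
--     output: list[str] = []
--     for i in range(height):
--         if not i or i + 1 == height:
--             output.append('*' * width + '\r\n')
--         else:
--             output.append('*' + ' ' * (width - 2) + '*\r\n')
--     return ''.join(output)
-- ===== SOURCE B (Python) =====
-- def get_rectangle_string(width, height):
--     # closed form: assemble from the three structural parts, no per-row loop
--     if height <= 0:
--         return ''
--     full = '*' * width + '\r\n'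
--     if height == 1:
--         return full
--     middle = '*' + ' ' * (width - 2) + '*\r\n'
--     return full + middle * (height - 2) + full
-- ===== Notes on version B (the rewrite author's own statement) =====
-- stated objective: simpler
-- what changed: Replaces the per-row loop with a branch-free condition check by building the rectangle in closed form from its three parts: full row, repeated middle row, full row (string repetition instead of iteration).
import Mathlib
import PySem

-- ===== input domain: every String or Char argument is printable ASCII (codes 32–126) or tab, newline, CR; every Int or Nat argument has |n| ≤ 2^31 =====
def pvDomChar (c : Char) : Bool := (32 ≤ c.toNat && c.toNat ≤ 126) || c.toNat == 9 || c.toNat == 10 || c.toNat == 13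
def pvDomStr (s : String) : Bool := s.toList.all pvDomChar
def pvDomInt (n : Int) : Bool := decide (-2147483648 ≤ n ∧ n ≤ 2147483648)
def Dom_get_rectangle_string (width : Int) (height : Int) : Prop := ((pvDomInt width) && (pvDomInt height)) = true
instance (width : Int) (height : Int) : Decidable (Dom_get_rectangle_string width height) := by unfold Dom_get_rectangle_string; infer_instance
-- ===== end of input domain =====

-- B changes the algorithm: closed-form assembly of the rectangle from its three parts (no per-row loop); objective: simpler.

-- ===== PORT A =====
-- A: loop over range(height), appending a full row when i==0 or i+1==height, else a bordered
-- middle row; join at the end. ('*' * width is PySem.List.pyRepeat ['*'] width on char lists;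
-- ''.join is flatten; exact on all inputs.)
def get_rectangle_string (width : Int) (height : Int) : String :=
  let output : List (List Char) :=
    (PySem.List.pyRange 0 height 1).foldl
      (fun acc i =>
        if i == 0 || i + 1 == height then
          acc ++ [PySem.List.pyRepeat ['*'] width ++ ['\r', '\n']]
        else
          acc ++ [['*'] ++ PySem.List.pyRepeat [' '] (width - 2) ++ ['*', '\r', '\n']])
      []
  String.mk output.flatten

-- ===== PORT B =====
-- B: '' for height<=0, the full row for height==1, else full ++ middle*(height-2) ++ full.
def get_rectangle_string_alt (width : Int) (height : Int) : String :=
  if height ≤ 0 then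
    String.mk []
  else
  let full : List Char := PySem.List.pyRepeat ['*'] width ++ ['\r', '\n']
  if height == 1 then
    String.mk full
  else
    let middle : List Char := ['*'] ++ PySem.List.pyRepeat [' '] (width - 2) ++ ['*', '\r', '\n']
    String.mk (full ++ PySem.List.pyRepeat middle (height - 2) ++ full)

-- ===== PRECONDITION & SPEC =====
def Spec_get_rectangle_string (width : Int) (height : Int) (out : String) : Prop := out = get_rectangle_string_alt width height
instance (width : Int) (height : Int) (out : String) : Decidable (Spec_get_rectangle_string width height out) := by unfold Spec_get_rectangle_string; infer_instance

-- ===== CLAIM (what is proved, stated in full; the proofs are below) =====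
def Claim_equal_get_rectangle_string : Prop := ∀ (width : Int) (height : Int), Dom_get_rectangle_string width height → Spec_get_rectangle_string width height (get_rectangle_string width height)

-- ===== LEMMAS AND PROOFS =====

-- the loop 'acc = acc ++ [f i]' is map
theorem pv_foldl_push {α β : Type} (f : β → List α) (l : List β) (init : List (List α)) :
    l.foldl (fun acc x => acc ++ [f x]) init = init ++ l.map f := by
  induction l generalizing init with
  | nil => simp
  | cons x xs ih => simp [List.foldl, ih]

-- the row list of A, for height = n ≥ 2, as three structural parts
theorem pv_map_range_three {α : Type} (g : Nat → α) (n : Nat) (h2 : 2 ≤ n) (a b : α)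
    (hg0 : g 0 = a) (hlast : g (n - 1) = a)
    (hmid : ∀ k, 0 < k → k < n - 1 → g k = b) :
    (List.range n).map g = a :: (List.replicate (n - 2) b ++ [a]) := by
  apply List.ext_getElem
  · simp; omega
  · intro i hi hi'
    simp only [List.getElem_map, List.getElem_range, List.getElem_cons]
    split
    · next h => subst h; exact hg0
    · next h =>
      have hi2 : i - 1 < n - 2 + 1 := by simp at hi; omega
      rw [List.getElem_append]
      split
      · next hlt =>
        rw [List.getElem_replicate]
        exact hmid i (by omega) (by simp at hlt; omega)
      · next hge =>
        simp only [List.length_replicate] at hge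
        have : i = n - 1 := by simp at hi; omega
        subst this
        simp [hlast]

-- ===== VERDICT (by name: the statement is the Claim_ definition above) =====
theorem get_rectangle_string_spec : Claim_equal_get_rectangle_string := by
  intro width height _
  unfold Spec_get_rectangle_string get_rectangle_string get_rectangle_string_alt
  simp only []
  by_cases h0 : height ≤ 0
  · rw [if_pos h0]
    have : PySem.List.pyRange 0 height 1 = [] :=
      PySem.List.pyRange_one_eq_nil (by omega)
    simp [this]
  · rw [if_neg h0]
    set full : List Char := PySem.List.pyRepeat ['*'] width ++ ['\r', '\n'] with hfull
    set mid : List Char := ['*'] ++ PySem.List.pyRepeat [' '] (width - 2) ++ ['*', '\r', '\n'] with hmid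
    obtain ⟨n, hn⟩ : ∃ n : Nat, height = (n : Int) :=
      ⟨height.toNat, by omega⟩
    subst hn
    rw [PySem.List.pyRange_zero_natCast]
    rw [List.foldl_map]
    have hf : ∀ init, (List.range n).foldl
        (fun acc (k : Nat) => if (k : Int) == 0 || (k : Int) + 1 == (n : Int) then acc ++ [full] else acc ++ [mid]) init
        = init ++ (List.range n).map (fun (k : Nat) => if (k : Int) == 0 || (k : Int) + 1 == (n : Int) then full else mid) := by
      intro init
      rw [show (fun (acc : List (List Char)) (k : Nat) =>
            if ((k : Int) == 0 || (k : Int) + 1 == (n : Int)) = true then acc ++ [full] else acc ++ [mid])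
          = fun acc (k : Nat) => acc ++ [if ((k : Int) == 0 || (k : Int) + 1 == (n : Int)) = true then full else mid]
          from by funext acc k; split <;> rfl]
      exact pv_foldl_push _ _ init
    rw [hf]
    by_cases h1 : (n : Int) == 1
    · rw [if_pos h1]
      have : n = 1 := by simpa using h1
      subst this
      simp
    · rw [if_neg h1]
      have h2 : 2 ≤ n := by
        simp only [beq_iff_eq] at h1
        omega
      rw [pv_map_range_three
            (fun k => if (k : Int) == 0 || (k : Int) + 1 == (n : Int) then full else mid)
            n h2 full mid
            (by simp)
            (by have : ((n - 1 : Nat) : Int) + 1 = (n : Int) := by omega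
                simp [this])
            (by intro k hk1 hk2
                have hne0 : ¬ ((k : Int) == 0) := by simp; omega
                have hnel : ¬ ((k : Int) + 1 == (n : Int)) := by simp; omega
                simp [hne0, hnel])]
      have hrep : PySem.List.pyRepeat mid ((n : Int) - 2)
          = (List.replicate (n - 2) mid).flatten := by
        unfold PySem.List.pyRepeat
        have : ((n : Int) - 2).toNat = n - 2 := by omega
        rw [this]
      simp [hrep]
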